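-- pv_equiv track=rewrite | github.com/MrBrantCode/unitest_baseline | mut_generate/mist_train_cf/cf_46555/solution.py | find_last_two_odd
-- ===== SOURCE A (Python) =====
-- def find_last_two_odd(input_list):
--     # Filter the numbers and only take odd numbers
--     odd_numbers = [i for i in input_list if isinstance(i, int) and i%2 != 0]
--
--     # Check if the length of odd_numbers list is 1 then return the last element twice
--     if len(odd_numbers) == 1:
--         return [odd_numbers[-1], odd_numbers[-1]]
--     # if there are no elements in the list, return [0, 0]
--     elif not odd_numbers:
--         return [0, 0]
--     # if there are more than one elements, return the last two elements
--     else: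
--         return odd_numbers[-2:]
-- ===== SOURCE B (Python) =====
-- def find_last_two_odd(input_list):
--     # Reverse scan: collect up to two odd ints, stopping early.
--     buf = []
--     for x in reversed(input_list):
--         if isinstance(x, int) and x % 2 != 0:
--             buf.append(x)
--             if len(buf) == 2:
--                 break
--     if not buf:
--         return [0, 0]
--     if len(buf) == 1:
--         return [buf[0], buf[0]]
--     return [buf[1], buf[0]]
-- ===== Notes on version B (the rewrite author's own statement) =====
-- stated objective: alternative
-- what changed: B scans the list backwards collecting at most two odd numbers and stops early, instead of materializing the full filtered list and slicing its tail.
import Mathlib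
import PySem

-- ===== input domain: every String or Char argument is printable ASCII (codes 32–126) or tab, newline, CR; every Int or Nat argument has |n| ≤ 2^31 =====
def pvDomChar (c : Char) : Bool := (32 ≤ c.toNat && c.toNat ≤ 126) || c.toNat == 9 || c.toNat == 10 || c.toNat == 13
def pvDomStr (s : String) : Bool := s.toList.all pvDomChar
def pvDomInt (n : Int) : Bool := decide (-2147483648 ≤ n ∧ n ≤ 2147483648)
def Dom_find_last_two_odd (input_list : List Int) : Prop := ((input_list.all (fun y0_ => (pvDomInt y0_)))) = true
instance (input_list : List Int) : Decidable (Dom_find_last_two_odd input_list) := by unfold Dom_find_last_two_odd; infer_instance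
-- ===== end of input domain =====

-- B scans the list backwards, collecting at most two odd numbers with an early stop,
-- instead of filtering the whole list and slicing its tail (objective: alternative).

-- ===== PORT A =====
def find_last_two_odd (input_list : List Int) : List Int :=
  let odd_numbers := input_list.filter (fun i => PySem.Int.mod i 2 != 0)
  if PySem.List.len odd_numbers = 1 then
    [PySem.List.pyGetD odd_numbers (-1) 0, PySem.List.pyGetD odd_numbers (-1) 0]
  else if odd_numbers = [] then
    [0, 0]
  else
    PySem.List.slice odd_numbers (some (-2)) none

-- ===== PORT B =====
-- the reverse loop of Source B: append odd elements to buf, break once buf has two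
def altLoop : List Int → List Int → List Int
  | [], buf => buf
  | x :: rest, buf =>
    if PySem.Int.mod x 2 != 0 then
      let buf' := buf ++ [x]
      if buf'.length = 2 then buf' else altLoop rest buf'
    else altLoop rest buf

def find_last_two_odd_alt (input_list : List Int) : List Int :=
  let buf := altLoop input_list.reverse []
  match buf with
  | [] => [0, 0]
  | [x] => [x, x]
  | x :: y :: _ => [y, x]

-- ===== PRECONDITION & SPEC =====
def Spec_find_last_two_odd (input_list : List Int) (out : List Int) : Prop := out = find_last_two_odd_alt input_list
instance (input_list : List Int) (out : List Int) : Decidable (Spec_find_last_two_odd input_list out) := by unfold Spec_find_last_two_odd; infer_instance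

-- ===== CLAIM (what is proved, stated in full; the proofs are below) =====
def Claim_equal_find_last_two_odd : Prop := ∀ (input_list : List Int), Dom_find_last_two_odd input_list → Spec_find_last_two_odd input_list (find_last_two_odd input_list)

-- ===== LEMMAS AND PROOFS =====

theorem altLoop_eq_take (xs : List Int) : ∀ buf : List Int, buf.length ≤ 1 →
    altLoop xs buf = (buf ++ xs.filter (fun i => PySem.Int.mod i 2 != 0)).take 2 := by
  induction xs with
  | nil =>
    intro buf h
    simp [altLoop, List.take_of_length_le (by omega : buf.length ≤ 2)]
  | cons x rest ih =>
    intro buf h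
    by_cases hp : (PySem.Int.mod x 2 != 0) = true
    · simp only [altLoop, hp, if_pos, List.filter_cons]
      by_cases h2 : (buf ++ [x]).length = 2
      · simp only [if_pos h2]
        match buf, h2 with
        | [b], _ => simp
      · simp only [if_neg h2]
        have hb : buf = [] := by
          cases buf with
          | nil => rfl
          | cons a t =>
            exfalso
            apply h2
            have ht : t = [] := by
              cases t with
              | nil => rfl
              | cons b u => simp at h
            subst ht; rfl
        subst hb
        simp only [List.nil_append]
        exact ih [x] (by simp)
    · simp only [altLoop, hp, List.filter_cons]
      rw [if_neg (by simpa using hp)]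
      exact ih buf h

theorem find_last_two_odd_eq (l : List Int) :
    find_last_two_odd l = find_last_two_odd_alt l := by
  unfold find_last_two_odd find_last_two_odd_alt
  rw [altLoop_eq_take _ [] (by simp), List.nil_append, List.filter_reverse]
  set f := l.filter (fun i => PySem.Int.mod i 2 != 0) with hf
  rcases hr : f.reverse with _ | ⟨x, _ | ⟨y, t⟩⟩
  · have : f = [] := by simpa using congrArg List.reverse hr
    simp [this, PySem.List.len]
  · have : f = [x] := by
      have := congrArg List.reverse hr; simp at this; exact this
    simp [this, PySem.List.len, PySem.List.pyGetD_neg_one ([x]) 0 (by simp)]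
  · have hfe : f = t.reverse ++ [y, x] := by
      have := congrArg List.reverse hr; simp at this; exact this
    have hlen : f.length = t.length + 2 := by simp [hfe]
    rw [if_neg (by simp [PySem.List.len, hlen]; omega),
        if_neg (by simp [hfe]),
        PySem.List.slice_from_neg_ofNat f 2 (by omega)]
    simp [hfe]

-- ===== VERDICT (by name: the statement is the Claim_ definition above) =====
theorem find_last_two_odd_spec : Claim_equal_find_last_two_odd := by
  intro l _
  unfold Spec_find_last_two_odd
  exact find_last_two_odd_eq l
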